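-- pv_equiv track=rewrite | github.com/alex2awesome/news-interview-question-generation | data_processing/gpt_classify_all_questions.py | extract_interviewer_questions
-- ===== SOURCE A (Python) =====
-- def extract_interviewer_questions(utt, speaker):
--     questions = []
--     answers = []
--     current_question = []
--     current_answer = []
--
--     interviewer = None
--     for s in speaker:
--         if 'host' in s.lower():
--             interviewer = s
--             break
--     if not interviewer:
--         interviewer = speaker[0]
--
--     # makes sure there's more than one unique speaker in the speaker list, return "not validate interview" lists
--     unique_speakers = set([s.split(",")[0].strip() for s in speaker])
--     if len(unique_speakers) == 1:
--         half_length = len(speaker) // 2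
--         return ["not validate 1-on-1 interview"] * half_length, ["not validate 1-on-1 interview"] * half_length
--
--     for i in range(len(utt)):
--         if interviewer.lower() in speaker[i].lower() or speaker[i].lower() in interviewer.lower():
--             if current_answer:
--                 questions.append(" ".join(current_question))
--                 answers.append(" ".join(current_answer))
--                 current_answer = []
--                 current_question = []
--             current_question.append(utt[i])
--         else:
--             current_answer.append(utt[i])
--
--     if current_question and current_answer:
--         questions.append(" ".join(current_question))
--         answers.append(" ".join(current_answer))
--
--     min_length = min(len(questions), len(answers))
--     questions = questions[:min_length]
--     answers = answers[:min_length]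
--
--     return questions, answers
-- ===== SOURCE B (Python) =====
-- # B: same interviewer selection and single-speaker early return; then classifies each
-- # utterance index, collapses consecutive same-speaker-type utterances into joined runs
-- # with itertools.groupby, and pairs the runs directly (leading answer run pairs with an
-- # empty question; a trailing unanswered question run is dropped).
-- from itertools import groupby
--
-- def extract_interviewer_questions(utt, speaker):
--     interviewer = None
--     for s in speaker:
--         if 'host' in s.lower():
--             interviewer = s
--             break
--     if not interviewer:
--         interviewer = speaker[0]
--
--     unique_speakers = set(s.split(",")[0].strip() for s in speaker)
--     if len(unique_speakers) == 1:
--         half_length = len(speaker) // 2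
--         return ["not validate 1-on-1 interview"] * half_length, ["not validate 1-on-1 interview"] * half_length
--
--     flags = [interviewer.lower() in speaker[i].lower() or speaker[i].lower() in interviewer.lower()
--              for i in range(len(utt))]
--     runs = [(flag, " ".join(u for _, u in grp))
--             for flag, grp in groupby(zip(flags, utt), key=lambda p: p[0])]
--
--     questions, answers = [], []
--     rest = runs
--     if runs and not runs[0][0]:
--         if len(runs) == 1:
--             return [], []
--         questions.append("")
--         answers.append(runs[0][1])
--         rest = runs[1:]
--     # rest alternates, starting with an interviewer run
--     for j in range(0, len(rest) - 1, 2):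
--         questions.append(rest[j][1])
--         answers.append(rest[j + 1][1])
--     return questions, answers
-- ===== Notes on version B (the rewrite author's own statement) =====
-- stated objective: alternative
-- what changed: Replaces A's stateful per-utterance loop with pending question/answer buffers by a run-based pipeline: classify each index, collapse consecutive same-type utterances into joined runs with itertools.groupby, then pair the alternating runs directly (leading answer run gets an empty question, trailing unanswered question run is dropped).
import Mathlib
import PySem

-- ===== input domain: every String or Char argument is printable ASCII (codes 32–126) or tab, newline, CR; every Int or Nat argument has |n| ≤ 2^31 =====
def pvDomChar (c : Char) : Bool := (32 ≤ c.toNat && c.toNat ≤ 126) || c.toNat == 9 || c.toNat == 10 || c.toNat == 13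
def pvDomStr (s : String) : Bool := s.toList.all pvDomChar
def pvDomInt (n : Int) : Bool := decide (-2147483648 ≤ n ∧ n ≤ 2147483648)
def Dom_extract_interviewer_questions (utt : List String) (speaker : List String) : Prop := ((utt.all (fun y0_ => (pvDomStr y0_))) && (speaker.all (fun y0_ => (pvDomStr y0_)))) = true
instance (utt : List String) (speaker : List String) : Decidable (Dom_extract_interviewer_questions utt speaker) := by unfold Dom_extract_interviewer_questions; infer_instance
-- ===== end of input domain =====

-- B restructures A's stateful per-utterance loop as: classify each index, collapse
-- consecutive same-type utterances into joined runs (itertools.groupby), and pair the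
-- alternating runs directly (objective: alternative decomposition, same cost).

-- ===== PORT A =====
-- helpers shared by both ports (B's Python keeps A's interviewer selection and
-- single-speaker early return verbatim, so these transliterations are shared)

-- " ".join(xs)
def pvJoin (xs : List String) : String := PySem.Str.join " " xs

-- 'host' in s.lower()
def pvIsHost (s : String) : Bool := PySem.Str.isIn "host" (PySem.Str.lower s)

-- s.split(",")[0].strip()   (split with a nonempty separator always yields a nonempty list,
-- so the getD/headD defaults are never hit)
def pvFirstField (s : String) : String :=
  PySem.Str.strip (((PySem.Str.split? s ",").getD []).headD "")

-- the for-s-in-speaker/break loop, then 'if not interviewer: interviewer = speaker[0]'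
-- (a found s contains 'host', hence is nonempty/truthy; speaker[0] on an empty list
-- raises in Python — excluded by Pre_, headD's default is junk there)
def pvInterviewer (speaker : List String) : String :=
  match speaker.find? (fun s => pvIsHost s) with
  | some s => s
  | none => speaker.headD ""

-- len(set(s.split(",")[0].strip() for s in speaker))
def pvUniqueCount (speaker : List String) : Nat :=
  (PySem.Set.ofList (speaker.map pvFirstField)).length

-- interviewer.lower() in speaker[i].lower() or speaker[i].lower() in interviewer.lower()
def pvIsQ (interviewer s : String) : Bool :=
  PySem.Str.isIn (PySem.Str.lower interviewer) (PySem.Str.lower s) ||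
  PySem.Str.isIn (PySem.Str.lower s) (PySem.Str.lower interviewer)

-- A's loop body, state ((questions, answers), (current_question, current_answer)),
-- consuming (flag, utt[i])
def pvStepA (st : (List String × List String) × (List String × List String))
    (x : Bool × String) : (List String × List String) × (List String × List String) :=
  match st, x with
  | ((qs, as), (cq, ca)), (f, u) =>
    if f then
      if !ca.isEmpty then ((qs ++ [pvJoin cq], as ++ [pvJoin ca]), ([u], []))
      else ((qs, as), (cq ++ [u], ca))
    else ((qs, as), (cq, ca ++ [u]))

-- the final 'if current_question and current_answer' flush
def pvFinish (st : (List String × List String) × (List String × List String)) :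
    List String × List String :=
  match st with
  | ((qs, as), (cq, ca)) =>
    if !cq.isEmpty && !ca.isEmpty then (qs ++ [pvJoin cq], as ++ [pvJoin ca]) else (qs, as)

def extract_interviewer_questions (utt : List String) (speaker : List String) :
    List String × List String :=
  let interviewer := pvInterviewer speaker
  if pvUniqueCount speaker == 1 then
    -- len(speaker)//2 on a nonnegative length is Nat division
    (List.replicate (speaker.length / 2) "not validate 1-on-1 interview",
     List.replicate (speaker.length / 2) "not validate 1-on-1 interview")
  else
    let st := (List.range utt.length).foldl
      (fun st i => pvStepA st (pvIsQ interviewer (speaker.getD i ""), utt.getD i ""))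
      (([], []), ([], []))
    let r := pvFinish st
    let m := min r.1.length r.2.length
    (r.1.take m, r.2.take m)

-- ===== PORT B =====
-- itertools.groupby on the (flag, utterance) pairs keyed by the flag: consecutive
-- pairs with equal flags are collapsed into one run (exact consecutive grouping)
def pvGroup : List (Bool × String) → List (Bool × List String)
  | [] => []
  | (f, u) :: ps =>
    match pvGroup ps with
    | (f', us) :: rs => if f == f' then (f, u :: us) :: rs else (f, [u]) :: (f', us) :: rs
    | [] => [(f, [u])]

-- the 'for j in range(0, len(rest) - 1, 2)' pairing loop over the run texts
def pvStride : List (Bool × String) → List String × List String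
  | a :: b :: rs => let (qs, as) := pvStride rs; (a.2 :: qs, b.2 :: as)
  | _ => ([], [])

def extract_interviewer_questions_alt (utt : List String) (speaker : List String) :
    List String × List String :=
  let interviewer := pvInterviewer speaker
  if pvUniqueCount speaker == 1 then
    (List.replicate (speaker.length / 2) "not validate 1-on-1 interview",
     List.replicate (speaker.length / 2) "not validate 1-on-1 interview")
  else
    let flags := (List.range utt.length).map
      (fun i => pvIsQ interviewer (speaker.getD i ""))
    let runs := (pvGroup (flags.zip utt)).map (fun r => (r.1, pvJoin r.2))
    match runs with
    | [] => ([], [])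
    | (false, t) :: rest =>
      if rest.isEmpty then ([], [])
      else
        let (qs, as) := pvStride rest
        ("" :: qs, t :: as)
    | rs => pvStride rs

-- ===== PRECONDITION & SPEC =====
-- Pre_ excludes exactly the inputs on which A raises IndexError: an empty speaker list
-- (speaker[0]), and utt longer than speaker (speaker[i]) unless the single-unique-speaker
-- early return fires first.  B raises on exactly the same inputs.
def Pre_extract_interviewer_questions (utt : List String) (speaker : List String) : Prop :=
  speaker ≠ [] ∧
    (utt.length ≤ speaker.length ∨
      (PySem.Set.ofList (speaker.map (fun s =>
        PySem.Str.strip (((PySem.Str.split? s ",").getD []).headD "")))).length = 1)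
instance (utt : List String) (speaker : List String) :
    Decidable (Pre_extract_interviewer_questions utt speaker) := by
  unfold Pre_extract_interviewer_questions; infer_instance

def pvWitness_extract_interviewer_questions : List String × List String :=
  (["Hello.", "Hi there.", "Why?"], ["A HOST, NPR", "B GUEST", "A HOST, NPR"])

def Spec_extract_interviewer_questions (utt : List String) (speaker : List String) (out : List String × List String) : Prop := out = extract_interviewer_questions_alt utt speaker
instance (utt : List String) (speaker : List String) (out : List String × List String) : Decidable (Spec_extract_interviewer_questions utt speaker out) := by unfold Spec_extract_interviewer_questions; infer_instance

-- ===== CLAIM (what is proved, stated in full; the proofs are below) =====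
def Claim_equal_extract_interviewer_questions : Prop := ∀ (utt : List String) (speaker : List String), Dom_extract_interviewer_questions utt speaker → Pre_extract_interviewer_questions utt speaker → Spec_extract_interviewer_questions utt speaker (extract_interviewer_questions utt speaker)

-- ===== LEMMAS AND PROOFS =====

-- Reference semantics of A's loop remainder: given pending question/answer buffers and
-- the remaining (flag, utterance) stream, the list of (question, answer) pairs still
-- to be emitted (including A's final flush).
def pvCont : List String → List String → List (Bool × String) → List (String × String)
  | cq, ca, [] => if !cq.isEmpty && !ca.isEmpty then [(pvJoin cq, pvJoin ca)] else []
  | cq, ca, (f, u) :: ps =>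
    if f then
      if !ca.isEmpty then (pvJoin cq, pvJoin ca) :: pvCont [u] [] ps
      else pvCont (cq ++ [u]) ca ps
    else pvCont cq (ca ++ [u]) ps

-- the same semantics consuming whole runs at a time
def pvContR : List String → List String → List (Bool × List String) → List (String × String)
  | cq, ca, [] => if !cq.isEmpty && !ca.isEmpty then [(pvJoin cq, pvJoin ca)] else []
  | cq, ca, (f, us) :: rs =>
    if f then
      if !ca.isEmpty then (pvJoin cq, pvJoin ca) :: pvContR us [] rs
      else pvContR (cq ++ us) ca rs
    else pvContR cq (ca ++ us) rs

-- runs alternate flags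
def pvAlt : List (Bool × List String) → Prop
  | [] => True
  | [_] => True
  | a :: b :: rs => a.1 ≠ b.1 ∧ pvAlt (b :: rs)

theorem pvAlt_tail {a : Bool × List String} {rs : List (Bool × List String)}
    (h : pvAlt (a :: rs)) : pvAlt rs := by
  cases rs with
  | nil => trivial
  | cons b rs => exact h.2

theorem pvAlt_cons_swap {f : Bool} {xs ys : List String}
    {rs : List (Bool × List String)} (h : pvAlt ((f, xs) :: rs)) :
    pvAlt ((f, ys) :: rs) := by
  cases rs with
  | nil => trivial
  | cons b rs => exact h

theorem pvGroup_nonempty : ∀ ps r, r ∈ pvGroup ps → r.2 ≠ [] := by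
  intro ps
  induction ps with
  | nil => intro r h; simp [pvGroup] at h
  | cons p ps ih =>
    obtain ⟨f, u⟩ := p
    intro r h
    simp only [pvGroup] at h
    cases hg : pvGroup ps with
    | nil => rw [hg] at h; simp at h; simp [h]
    | cons q rs =>
      obtain ⟨f', us⟩ := q
      rw [hg] at h
      by_cases hf : f = f'
      · simp [hf] at h
        rcases h with h | h
        · simp [h]
        · exact ih r (by rw [hg]; simp [h])
      · simp [hf] at h
        rcases h with h | h | h
        · simp [h]
        · exact ih r (by rw [hg]; simp [h])
        · exact ih r (by rw [hg]; simp [h])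

theorem pvGroup_alt : ∀ ps, pvAlt (pvGroup ps) := by
  intro ps
  induction ps with
  | nil => simp [pvGroup, pvAlt]
  | cons p ps ih =>
    obtain ⟨f, u⟩ := p
    simp only [pvGroup]
    cases hg : pvGroup ps with
    | nil => simp [pvAlt]
    | cons q rs =>
      obtain ⟨f', us⟩ := q
      rw [hg] at ih
      show pvAlt (if (f == f') = true then (f, u :: us) :: rs else (f, [u]) :: (f', us) :: rs)
      by_cases hf : f = f'
      · subst hf
        rw [if_pos (by simp)]
        exact pvAlt_cons_swap ih
      · rw [if_neg (by simp [hf])]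
        exact ⟨hf, ih⟩

-- absorption: a singleton run followed by a same-flag run merges
theorem pvContR_absorb (f : Bool) (u : String) (us : List String) (cq ca : List String)
    (rs : List (Bool × List String)) :
    pvContR cq ca ((f, [u]) :: (f, us) :: rs) = pvContR cq ca ((f, u :: us) :: rs) := by
  cases f with
  | false => simp [pvContR, List.append_assoc]
  | true => by_cases hca : ca.isEmpty <;> simp [pvContR, hca, List.append_assoc]

theorem pvCont_eq_pvContR_group : ∀ (ps : List (Bool × String)) (cq ca : List String),
    pvCont cq ca ps = pvContR cq ca (pvGroup ps) := by
  intro ps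
  induction ps with
  | nil => intro cq ca; rfl
  | cons p ps ih =>
    obtain ⟨f, u⟩ := p
    intro cq ca
    have step : pvContR cq ca ((f, [u]) :: pvGroup ps) = pvCont cq ca ((f, u) :: ps) := by
      cases f with
      | false => simp [pvCont, pvContR, ih]
      | true => by_cases hca : ca.isEmpty <;> simp [pvCont, pvContR, hca, ih]
    simp only [pvGroup]
    cases hg : pvGroup ps with
    | nil => rw [hg] at step; exact step.symm
    | cons q rs =>
      obtain ⟨f', us⟩ := q
      show pvCont cq ca ((f, u) :: ps) =
        pvContR cq ca (if (f == f') = true then (f, u :: us) :: rs else (f, [u]) :: (f', us) :: rs)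
      by_cases hf : f = f'
      · subst hf
        rw [if_pos (by simp), ← pvContR_absorb, ← hg]
        exact step.symm
      · rw [if_neg (by simp [hf]), ← hg]
        exact step.symm

-- A's loop followed by the flush computes the initial (questions, answers) extended by
-- the pairs of pvCont
theorem pvFoldA_eq_pvCont : ∀ (ps : List (Bool × String)) (qs as cq ca : List String),
    pvFinish (ps.foldl pvStepA ((qs, as), (cq, ca))) =
      (qs ++ (pvCont cq ca ps).map Prod.fst, as ++ (pvCont cq ca ps).map Prod.snd) := by
  intro ps
  induction ps with
  | nil =>
    intro qs as cq ca
    simp only [List.foldl_nil, pvFinish, pvCont]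
    by_cases h : !cq.isEmpty && !ca.isEmpty <;> simp [h]
  | cons p ps ih =>
    obtain ⟨f, u⟩ := p
    intro qs as cq ca
    simp only [List.foldl_cons, pvStepA, pvCont]
    cases f with
    | false => simpa using ih qs as cq (ca ++ [u])
    | true =>
      by_cases hca : ca.isEmpty
      · simpa [hca] using ih qs as (cq ++ [u]) ca
      · have hca2 : (!ca.isEmpty) = true := by rw [Bool.not_eq_true']; exact eq_false_of_ne_true hca
        rw [if_pos (by simp), if_pos hca2, if_pos hca2]
        rw [ih (qs ++ [pvJoin cq]) (as ++ [pvJoin ca]) [u] []]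
        simp

-- the stride pairing of the joined runs equals pvContR from empty buffers, for
-- alternating nonempty runs whose first run (if any) is a question run
theorem pvStride_eq_pvContR : ∀ (R : List (Bool × List String)),
    pvAlt R → (∀ r ∈ R, r.2 ≠ []) → (∀ b us rs, R = (b, us) :: rs → b = true) →
    pvStride (R.map (fun r => (r.1, pvJoin r.2))) =
      ((pvContR [] [] R).map Prod.fst, (pvContR [] [] R).map Prod.snd) := by
  intro R
  match R with
  | [] => intro _ _ _; rfl
  | [(b, vs)] =>
    intro _ _ hhead
    have hb := hhead b vs [] rfl
    subst hb
    simp [pvStride, pvContR]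
  | (b, vs) :: (b2, ws) :: rs =>
    intro halt hne hhead
    have hb := hhead b vs _ rfl
    subst hb
    have hb2 : b2 = false := by
      have h := halt.1
      cases b2
      · rfl
      · exact absurd rfl h
    subst hb2
    have hvs : vs ≠ [] := hne (true, vs) (by simp)
    have hws : ws ≠ [] := hne (false, ws) (by simp)
    have halt' : pvAlt rs := pvAlt_tail (pvAlt_tail halt)
    have hne' : ∀ r ∈ rs, r.2 ≠ [] := fun r hr => hne r (by simp [hr])
    have hhead' : ∀ b us rs', rs = (b, us) :: rs' → b = true := by
      intro b us rs' h
      subst h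
      cases b
      · exact absurd rfl (pvAlt_tail halt).1
      · rfl
    have ih := pvStride_eq_pvContR rs halt' hne' hhead'
    -- left side: one stride step
    simp only [List.map_cons, pvStride, ih]
    -- right side: unfold pvContR through the question and answer runs
    have h1 : pvContR [] [] ((true, vs) :: (false, ws) :: rs) = pvContR vs ws rs := by
      simp [pvContR]
    rw [h1]
    have h2 : pvContR vs ws rs = (pvJoin vs, pvJoin ws) :: pvContR [] [] rs := by
      cases rs with
      | nil => simp [pvContR, hvs, hws]
      | cons q rs' =>
        obtain ⟨b3, xs⟩ := q
        have hb3 : b3 = true := hhead' b3 xs rs' rfl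
        subst hb3
        simp [pvContR, hws]
    rw [h2]
    simp

-- index fold over range = pair fold over flags zipped with utterances
theorem pvFold_range_eq_zip : ∀ (utt : List String) (g : Nat → Bool)
    (st : (List String × List String) × (List String × List String)),
    (List.range utt.length).foldl (fun st i => pvStepA st (g i, utt.getD i "")) st =
      (((List.range utt.length).map g).zip utt).foldl pvStepA st := by
  intro utt
  induction utt with
  | nil => intro g st; rfl
  | cons u us ih =>
    intro g st
    simp only [List.length_cons, List.range_succ_eq_map, List.map_cons, List.map_map,
      List.foldl_cons, List.zip_cons_cons, List.getD_cons_zero, List.foldl_map]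
    rw [show (fun st (i : Nat) => pvStepA st (g (Nat.succ i), (u :: us).getD (Nat.succ i) ""))
        = (fun st (i : Nat) => pvStepA st ((g ∘ Nat.succ) i, us.getD i "")) from by
      funext st i; simp [Function.comp]]
    exact ih (g ∘ Nat.succ) (pvStepA st (g 0, u))


-- B's run-pairing equals pvContR from empty buffers on the runs of any pair stream
theorem pvAltB_eq_pvContR (ps : List (Bool × String)) :
    (match (pvGroup ps).map (fun r => (r.1, pvJoin r.2)) with
      | [] => (([] : List String), ([] : List String))
      | (false, t) :: rest =>
        if rest.isEmpty then ([], [])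
        else
          let (qs, as) := pvStride rest
          ("" :: qs, t :: as)
      | rs => pvStride rs) =
      ((pvContR [] [] (pvGroup ps)).map Prod.fst,
       (pvContR [] [] (pvGroup ps)).map Prod.snd) := by
  have halt := pvGroup_alt ps
  have hne := pvGroup_nonempty ps
  cases hg : pvGroup ps with
  | nil => simp [pvContR]
  | cons q R'
    =>
    obtain ⟨f, us⟩ := q
    rw [hg] at halt
    have hus : us ≠ [] := hne (f, us) (by rw [hg]; simp)
    have hne' : ∀ r ∈ R', r.2 ≠ [] := fun r hr => hne r (by rw [hg]; simp [hr])
    cases f with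
    | true =>
      simp only [List.map_cons]
      have := pvStride_eq_pvContR ((true, us) :: R')
        halt
        (by
          intro r hr
          rcases List.mem_cons.mp hr with h | h
          · simp [h, hus]
          · exact hne' r h)
        (by intro b v rs h; cases h; rfl)
      simpa using this
    | false =>
      simp only [List.map_cons]
      cases R' with
      | nil =>
        simp [pvContR]
      | cons q2 rs =>
        obtain ⟨b2, ws⟩ := q2
        have hb2 : b2 = true := by
          cases b2
          · exact absurd rfl halt.1
          · rfl
        subst hb2
        have hws : ws ≠ [] := hne' (true, ws) (by simp)
        have halt' : pvAlt ((true, ws) :: rs) := pvAlt_tail halt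
        have hstr := pvStride_eq_pvContR ((true, ws) :: rs) halt'
          (by
            intro r hr
            rcases List.mem_cons.mp hr with h | h
            · simp [h, hws]
            · exact hne' r (by simp [h]))
          (by intro b v rs' h; cases h; rfl)
        have h1 : pvContR [] [] ((false, us) :: (true, ws) :: rs) =
            ("", pvJoin us) :: pvContR [] [] ((true, ws) :: rs) := by
          simp [pvContR, hus, show pvJoin [] = "" from rfl]
        rw [h1]
        simp only [List.map_cons] at hstr
        simp [hstr]

-- ===== VERDICT (by name: the statement is the Claim_ definition above) =====
theorem extract_interviewer_questions_spec : Claim_equal_extract_interviewer_questions := by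
  intro utt speaker _hdom _hpre
  unfold Spec_extract_interviewer_questions
  unfold extract_interviewer_questions extract_interviewer_questions_alt
  by_cases hu : pvUniqueCount speaker == 1
  · simp only [hu, if_true]
  · simp only [hu, if_false, Bool.false_eq_true]
    rw [pvFold_range_eq_zip utt (fun i => pvIsQ (pvInterviewer speaker) (speaker.getD i ""))]
    set ps := (((List.range utt.length).map
      (fun i => pvIsQ (pvInterviewer speaker) (speaker.getD i ""))).zip utt) with hps
    have hA := pvFoldA_eq_pvCont ps [] [] [] []
    simp only [List.nil_append] at hA
    rw [hA]
    rw [pvCont_eq_pvContR_group]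
    rw [pvAltB_eq_pvContR ps]
    simp
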